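/- GENERATED by tools/from_farm_form.py from prooffarm-gif/accepted/DGifSlurp.5/Proof.lean (a worked proof of the farm's unit `DGifSlurp.5`,
   accepted by the verdict) — do not edit. -/
import Gif.Spec.Units.DGifSlurp_5
import Gif.Spec.AllSegs
import Gif.Spec.Proved.DGifSlurp_5_Lemmas

open X86 X86.User Asan ProgX.Base ProgX.Base.Spec Gif.Spec

/-!
  `DGifSlurp.5` (10A777H … 10A7BDH, 10A923H … 10A932H, 10A942H … 10A948H; dgif_lib.c:1216-1230, 1241): THE RASTER IS ALLOCATED AND
  ADOPTED. The call's return address 10A78CH (`ret8`) is not a cut of the design, so the unit makes it one of its own: the private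
  assertion `seg5_Ret8` (Lemmas.lean) and three walks, chained here:
      seg5_call   10A777H … the call of openbsd_reallocarray … 10A78CH, both arms of `AllocPost`
      seg5_null   10A78CH … the store of NULL, DGifDecreaseImageCounter … 10A8EDH (`Exit`)
      seg5_ok     10A78CH … the store of the raster (the adoption), the test of `Interlace` … 10A7BDH (`NI`) | 10A948H (`PassHead`)
-/

/-- Segment 5 of `DGifSlurp` takes `Sized` at 10A777H to `NI` at 10A7BDH, `PassHead` at 10A948H, or `Exit` at 10A8EDH. -/
theorem Gif.Spec.Proved.DGifSlurp_5_ok : Gif.Spec.DGifSlurp_5.Statement := by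
  intro Lay hLay μ hμ u₀ hcode h_ra h_store8 h_load1 h_dec H rest frames F R Hc Fc m e ret v hat
  -- reallocarray's contract for the present heap and the frame list of the body; `optr = NULL`: the ghosts `n c` are not used
  have hra := h_ra Hc rest (DGifSlurp.framesIn frames e) 0 0
  -- 10A777H … the call … 10A78CH (ret8)
  refine (Gif.Spec.DGifSlurp_5.seg5_call Lay hLay μ hμ u₀ hcode H rest frames F R Hc Fc m e ret hra v hat).trans ?_
  intro v1 hv1
  obtain ⟨Hx, W, Hh, hr8⟩ := hv1
  rcases hr8.res with hnull | hown
  · -- NULL: 10A78CH … DGifDecreaseImageCounter … 10A8EDH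
    exact Gif.Spec.DGifSlurp_5.seg5_null Lay hLay μ hμ u₀ hcode H rest frames F R Hx Fc m W Hh e ret h_store8
      (fun init g => h_dec Hx rest (DGifSlurp.framesIn frames e) Fc R init g) v1 hr8 hnull
  · -- the raster: 10A78CH … 10A7BDH | 10A948H
    exact Gif.Spec.DGifSlurp_5.seg5_ok Lay hLay μ hμ u₀ hcode H rest frames F R Hx Fc m W Hh e ret h_store8 h_load1 v1 hr8
      hown
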